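-- pv_equiv track=rewrite | github.com/Ellen010/arithmetic_visualizer | main.py | arithmetic_visualizer
-- ===== SOURCE A (Python) =====
-- def arithmetic_visualizer(problems, display_answers=False):
--     if len(problems) > 5:
--         return "Error: Too many problems."
--     first_operands = []
--     second_operands = []
--     operators = []
--     answers = []
--     arranged_problems = []
--     for problem in problems:
--         parts = problem.split()
--         if len(parts) != 3:
--             return "Error: Incorrect problem format."
--         first_operand, operator, second_operand = parts
--         if operator not in ('+', '-'):
--             return "Error: Operator must be '+' or '-'."
--         if not first_operand.isdigit() or not second_operand.isdigit():
--             return "Error: Numbers must only contain digits."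
--         if len(first_operand) > 4 or len(second_operand) > 4:
--             return "Error: Numbers cannot be more than four digits."
--         first_operands.append(first_operand)
--         second_operands.append(second_operand)
--         operators.append(operator)
--         if display_answers:
--             if operator == '+':
--                 answers.append(str(int(first_operand) + int(second_operand)))
--             else:
--                 answers.append(str(int(first_operand) - int(second_operand)))
--     first_line = ''
--     second_line = ''
--     dashes = ''
--     answer_line = ''
--     for i in range(len(problems)):
--         width = max(len(first_operands[i]), len(second_operands[i])) + 2
--         first_line += first_operands[i].rjust(width) + '    '
--         second_line += operators[i] + second_operands[i].rjust(width - 1) + '    '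
--         dashes += '-' * width + '    '
--         if display_answers:
--             answer_line += answers[i].rjust(width) + '    '
--     if display_answers:
--         arranged_problems = f"{first_line.rstrip()}\n{second_line.rstrip()}\n{dashes.rstrip()}\n{answer_line.rstrip()}"
--     else:
--         arranged_problems = f"{first_line.rstrip()}\n{second_line.rstrip()}\n{dashes.rstrip()}"
--     return arranged_problems
-- ===== SOURCE B (Python) =====
-- def _validate(problem):
--     parts = problem.split()
--     if len(parts) != 3:
--         return "Error: Incorrect problem format."
--     a, op, b = parts
--     if op not in ('+', '-'):
--         return "Error: Operator must be '+' or '-'."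
--     if not a.isdigit() or not b.isdigit():
--         return "Error: Numbers must only contain digits."
--     if len(a) > 4 or len(b) > 4:
--         return "Error: Numbers cannot be more than four digits."
--     return None
--
--
-- def _cell(row, a, op, b):
--     w = max(len(a), len(b)) + 2
--     if row == 0:
--         return a.rjust(w)
--     if row == 1:
--         return op + b.rjust(w - 1)
--     if row == 2:
--         return '-' * w
--     return str(int(a) + int(b) if op == '+' else int(a) - int(b)).rjust(w)
--
--
-- def arithmetic_visualizer(problems, display_answers=False):
--     if len(problems) > 5:
--         return "Error: Too many problems."
--     for problem in problems:
--         err = _validate(problem)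
--         if err is not None:
--             return err
--     triples = [problem.split() for problem in problems]
--     return '\n'.join(
--         '    '.join(_cell(row, a, op, b) for a, op, b in triples)
--         for row in range(4 if display_answers else 3))
-- ===== Notes on version B (the rewrite author's own statement) =====
-- stated objective: alternative
-- what changed: B transposes the construction: a standalone validation pass returns the first error, then the output is rendered row-major -- an outer loop over the 3/4 output rows joining a per-cell renderer over the parsed problems -- instead of A's problem-major loop accumulating four parallel operand lists followed by an indexed loop concatenating separator-padded strings that are rstrip'd.
import Mathlib
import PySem

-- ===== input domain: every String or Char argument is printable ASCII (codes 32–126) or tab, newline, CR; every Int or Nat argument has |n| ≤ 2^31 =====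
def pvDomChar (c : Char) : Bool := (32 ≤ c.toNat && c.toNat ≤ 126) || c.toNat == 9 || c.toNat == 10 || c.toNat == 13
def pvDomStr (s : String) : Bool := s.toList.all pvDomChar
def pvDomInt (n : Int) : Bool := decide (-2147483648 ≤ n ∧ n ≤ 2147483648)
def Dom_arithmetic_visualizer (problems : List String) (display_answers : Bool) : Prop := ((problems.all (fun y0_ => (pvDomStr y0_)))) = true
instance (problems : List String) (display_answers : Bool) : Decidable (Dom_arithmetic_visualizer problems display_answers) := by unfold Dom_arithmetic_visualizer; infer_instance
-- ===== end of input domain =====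

-- B renders the output row-major (outer loop over the 3/4 output rows, inner join of a per-cell
-- renderer over the parsed problems), after a standalone validation pass; A is problem-major.

def pvSp4 : List Char := [' ', ' ', ' ', ' ']

-- s.rjust(w): pad with spaces on the left to width w (exact for w ≥ 0, the only case used)
def pvRjust (cs : List Char) (w : Nat) : List Char := List.replicate (w - cs.length) ' ' ++ cs

-- ===== PORT A =====
-- A's in-loop validation and unpacking of one problem (branches in A's order)
def pvParse (problem : String) : Except (List Char) (List Char × List Char × List Char) :=
  match PySem.Chars.split₀ problem.toList with
  | [a, op, b] =>
    if ¬ (op = ['+'] ∨ op = ['-']) then .error "Error: Operator must be '+' or '-'.".toList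
    else if ¬ (PySem.Chars.strIsdigit a = true) ∨ ¬ (PySem.Chars.strIsdigit b = true) then
      .error "Error: Numbers must only contain digits.".toList
    else if a.length > 4 ∨ b.length > 4 then .error "Error: Numbers cannot be more than four digits.".toList
    else .ok (a, op, b)
  | _ => .error "Error: Incorrect problem format.".toList

def pvAnswer (a op b : List Char) : List Char :=
  if op = ['+'] then PySem.Int.toChars ((PySem.Int.ofChars? a).getD 0 + (PySem.Int.ofChars? b).getD 0)
  else PySem.Int.toChars ((PySem.Int.ofChars? a).getD 0 - (PySem.Int.ofChars? b).getD 0)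

-- A's first loop: validate and collect first operands, second operands, operators, answers
def pvA_collect (da : Bool) : List String → Except (List Char) (List (List Char) × List (List Char) × List (List Char) × List (List Char))
  | [] => .ok ([], [], [], [])
  | p :: rest =>
    match pvParse p with
    | .error e => .error e
    | .ok (a, op, b) =>
      match pvA_collect da rest with
      | .error e => .error e
      | .ok (fos, sos, ops, ans) =>
        .ok (a :: fos, b :: sos, op :: ops, if da then pvAnswer a op b :: ans else ans)

def arithmetic_visualizer (problems : List String) (display_answers : Bool) : String :=
  if problems.length > 5 then "Error: Too many problems."
  else
    match pvA_collect display_answers problems with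
    | .error e => String.mk e
    | .ok (fos, sos, ops, ans) =>
      -- A's second loop: for i in range(len(problems)) build the four lines by appending
      let res := (PySem.List.pyRange 0 (problems.length : Int)).foldl
        (fun (st : List Char × List Char × List Char × List Char) i =>
          let fo := PySem.List.pyGetD fos i []
          let so := PySem.List.pyGetD sos i []
          let op := PySem.List.pyGetD ops i []
          let width := max fo.length so.length + 2
          (st.1 ++ pvRjust fo width ++ pvSp4,
           st.2.1 ++ op ++ pvRjust so (width - 1) ++ pvSp4,
           st.2.2.1 ++ List.replicate width '-' ++ pvSp4,
           if display_answers then st.2.2.2 ++ pvRjust (PySem.List.pyGetD ans i []) width ++ pvSp4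
           else st.2.2.2)) ([], [], [], [])
      if display_answers then
        String.mk (PySem.Chars.rstrip res.1 ++ '\n' :: PySem.Chars.rstrip res.2.1 ++ '\n' ::
          PySem.Chars.rstrip res.2.2.1 ++ '\n' :: PySem.Chars.rstrip res.2.2.2)
      else
        String.mk (PySem.Chars.rstrip res.1 ++ '\n' :: PySem.Chars.rstrip res.2.1 ++ '\n' ::
          PySem.Chars.rstrip res.2.2.1)

-- ===== PORT B =====
-- B's _validate: first error message for one problem, or none
def pvValidate (problem : String) : Option (List Char) :=
  match PySem.Chars.split₀ problem.toList with
  | [a, op, b] =>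
    if ¬ (op = ['+'] ∨ op = ['-']) then some "Error: Operator must be '+' or '-'.".toList
    else if ¬ (PySem.Chars.strIsdigit a = true) ∨ ¬ (PySem.Chars.strIsdigit b = true) then
      some "Error: Numbers must only contain digits.".toList
    else if a.length > 4 ∨ b.length > 4 then some "Error: Numbers cannot be more than four digits.".toList
    else none
  | _ => some "Error: Incorrect problem format.".toList

-- B's _cell: the piece of output row `row` contributed by one problem
def pvCell (row : Int) (a op b : List Char) : List Char :=
  let w := max a.length b.length + 2
  if row = 0 then pvRjust a w
  else if row = 1 then op ++ pvRjust b (w - 1)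
  else if row = 2 then List.replicate w '-'
  else pvRjust (if op = ['+']
      then PySem.Int.toChars ((PySem.Int.ofChars? a).getD 0 + (PySem.Int.ofChars? b).getD 0)
      else PySem.Int.toChars ((PySem.Int.ofChars? a).getD 0 - (PySem.Int.ofChars? b).getD 0)) w

-- B's validation loop: first error over all problems
def pvFirstErr : List String → Option (List Char)
  | [] => none
  | p :: rest =>
    match pvValidate p with
    | some e => some e
    | none => pvFirstErr rest

def arithmetic_visualizer_alt (problems : List String) (display_answers : Bool) : String :=
  if problems.length > 5 then "Error: Too many problems."
  else
    match pvFirstErr problems with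
    | some e => String.mk e
    | none =>
      let triples := problems.map (fun p => PySem.Chars.split₀ p.toList)
      String.mk (PySem.Chars.join ['\n']
        ((PySem.List.pyRange 0 (if display_answers then 4 else 3)).map (fun row =>
          PySem.Chars.join pvSp4 (triples.map (fun t =>
            match t with
            | [a, op, b] => pvCell row a op b
            | _ => [])))))   -- unreachable: validation guarantees 3 parts (Python unpacking)

-- ===== PRECONDITION & SPEC =====
def Spec_arithmetic_visualizer (problems : List String) (display_answers : Bool) (out : String) : Prop := out = arithmetic_visualizer_alt problems display_answers
instance (problems : List String) (display_answers : Bool) (out : String) : Decidable (Spec_arithmetic_visualizer problems display_answers out) := by unfold Spec_arithmetic_visualizer; infer_instance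

-- ===== CLAIM (what is proved, stated in full; the proofs are below) =====
def Claim_equal_arithmetic_visualizer : Prop := ∀ (problems : List String) (display_answers : Bool), Dom_arithmetic_visualizer problems display_answers → Spec_arithmetic_visualizer problems display_answers (arithmetic_visualizer problems display_answers)

-- ===== LEMMAS AND PROOFS =====

-- a piece is "solid" if it is nonempty and carries no trailing whitespace
def pvSolid (p : List Char) : Prop := PySem.Chars.rstrip p = p ∧ p ≠ []

theorem pvDropWhile_eq_self {l : List Char} (h : ∀ c ∈ l, PySem.Chars.isspace c = false) :
    l.dropWhile PySem.Chars.isspace = l := by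
  induction l with
  | nil => rfl
  | cons c t ih =>
    rw [List.dropWhile_cons]
    simp only [h c (List.mem_cons_self), Bool.false_eq_true, if_false]

theorem pvRstrip_all_nonspace {cs : List Char} (h : ∀ c ∈ cs, PySem.Chars.isspace c = false) :
    PySem.Chars.rstrip cs = cs := by
  unfold PySem.Chars.rstrip
  rw [pvDropWhile_eq_self (by intro c hc; exact h c (List.mem_reverse.mp hc)), List.reverse_reverse]

theorem pvRstrip_append {xs ys : List Char} (h : PySem.Chars.rstrip ys ≠ []) :
    PySem.Chars.rstrip (xs ++ ys) = xs ++ PySem.Chars.rstrip ys := by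
  unfold PySem.Chars.rstrip at *
  have h' : (ys.reverse.dropWhile PySem.Chars.isspace).isEmpty = false := by
    rw [List.isEmpty_eq_false_iff]
    intro he; exact h (by rw [he]; rfl)
  rw [List.reverse_append, List.dropWhile_append, h']
  simp

theorem pvRstrip_sp4 (xs : List Char) : PySem.Chars.rstrip (xs ++ pvSp4) = PySem.Chars.rstrip xs := by
  unfold PySem.Chars.rstrip
  rw [List.reverse_append, List.dropWhile_append]
  rfl

theorem pvSolid_append_of (xs : List Char) {ys : List Char}
    (hy : PySem.Chars.rstrip ys = ys) (hne : ys ≠ []) : pvSolid (xs ++ ys) := by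
  refine ⟨?_, by simp [hne]⟩
  rw [pvRstrip_append (by rw [hy]; exact hne), hy]

theorem pvIsdigit_nonspace {c : Char} (h : PySem.Chars.isdigit c = true) :
    PySem.Chars.isspace c = false := by
  simp only [PySem.Chars.isdigit, Bool.and_eq_true, decide_eq_true_eq] at h
  have h1 : 48 ≤ c.toNat := h.1
  have h2 : c.toNat ≤ 57 := h.2
  simp only [PySem.Chars.isspace]
  simp only [Bool.or_eq_false_iff, Bool.and_eq_false_iff, decide_eq_false_iff_not]
  omega

theorem pvRstrip_digits {cs : List Char} (h : PySem.Chars.strIsdigit cs = true) :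
    PySem.Chars.rstrip cs = cs := by
  apply pvRstrip_all_nonspace
  intro c hc
  simp only [PySem.Chars.strIsdigit, Bool.and_eq_true, List.all_eq_true] at h
  exact pvIsdigit_nonspace (h.2 c hc)

theorem pvDigits_ne_nil {cs : List Char} (h : PySem.Chars.strIsdigit cs = true) : cs ≠ [] := by
  simp only [PySem.Chars.strIsdigit, Bool.and_eq_true] at h
  simpa using h.1

theorem pvSolid_rjust_digits {a : List Char} (w : Nat) (h : PySem.Chars.strIsdigit a = true) :
    pvSolid (pvRjust a w) :=
  pvSolid_append_of _ (pvRstrip_digits h) (pvDigits_ne_nil h)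

theorem pvSolid_op_rjust (op : List Char) {b : List Char} (w : Nat)
    (h : PySem.Chars.strIsdigit b = true) : pvSolid (op ++ pvRjust b w) := by
  have := pvSolid_append_of (op ++ List.replicate (w - b.length) ' ') (pvRstrip_digits h) (pvDigits_ne_nil h)
  simpa [pvRjust, List.append_assoc] using this

theorem pvSolid_dashes (w : Nat) (hw : 0 < w) : pvSolid (List.replicate w '-') := by
  refine ⟨pvRstrip_all_nonspace ?_, by simp [Nat.pos_iff_ne_zero.mp hw]⟩
  intro c hc
  rw [List.eq_of_mem_replicate hc]
  rfl

theorem pvDigitChar_nonspace (n : Nat) : PySem.Chars.isspace (Nat.digitChar n) = false := by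
  rcases n with _|_|_|_|_|_|_|_|_|_|_|_|_|_|_|_|n
  · decide
  · decide
  · decide
  · decide
  · decide
  · decide
  · decide
  · decide
  · decide
  · decide
  · decide
  · decide
  · decide
  · decide
  · decide
  · decide
  · have : Nat.digitChar (n + 16) = '*' := by
      unfold Nat.digitChar
      rw [if_neg (by omega), if_neg (by omega), if_neg (by omega), if_neg (by omega),
        if_neg (by omega), if_neg (by omega), if_neg (by omega), if_neg (by omega),
        if_neg (by omega), if_neg (by omega), if_neg (by omega), if_neg (by omega),
        if_neg (by omega), if_neg (by omega), if_neg (by omega), if_neg (by omega)]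
    rw [this]; rfl

theorem pvTDC_nonspace (b : Nat) : ∀ (fuel n : Nat) (ds : List Char),
    (∀ c ∈ ds, PySem.Chars.isspace c = false) →
    ∀ c ∈ Nat.toDigitsCore b fuel n ds, PySem.Chars.isspace c = false := by
  intro fuel
  induction fuel with
  | zero => intro n ds hds; simpa [Nat.toDigitsCore] using hds
  | succ fuel ih =>
    intro n ds hds c hc
    rw [Nat.toDigitsCore.eq_def] at hc
    simp only [] at hc
    by_cases hz : n / b = 0
    · simp only [hz, if_true] at hc
      rcases List.mem_cons.mp hc with h | h
      · subst h; exact pvDigitChar_nonspace _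
      · exact hds c h
    · simp only [hz, if_false] at hc
      refine ih _ _ ?_ c hc
      intro c' hc'
      rcases List.mem_cons.mp hc' with h | h
      · subst h; exact pvDigitChar_nonspace _
      · exact hds c' h

theorem pvTDC_ne_nil (b : Nat) : ∀ (fuel n : Nat) (ds : List Char), ds ≠ [] →
    Nat.toDigitsCore b fuel n ds ≠ [] := by
  intro fuel
  induction fuel with
  | zero => intro n ds hds; simpa [Nat.toDigitsCore] using hds
  | succ fuel ih =>
    intro n ds hds
    rw [Nat.toDigitsCore.eq_def]
    simp only []
    by_cases hz : n / b = 0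
    · simp [hz]
    · simp only [hz, if_false]
      exact ih _ _ (by simp)

theorem pvToDigits_ne_nil (b n : Nat) : Nat.toDigits b n ≠ [] := by
  unfold Nat.toDigits
  rw [Nat.toDigitsCore.eq_def]
  simp only []
  by_cases hz : n / b = 0
  · simp [hz]
  · simp only [hz, if_false]
    exact pvTDC_ne_nil b _ _ _ (by simp)

theorem pvToChars_solid (z : Int) : pvSolid (PySem.Int.toChars z) := by
  unfold pvSolid PySem.Int.toChars
  constructor
  · apply pvRstrip_all_nonspace
    intro c hc
    split_ifs at hc with hz
    · rcases List.mem_cons.mp hc with h | h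
      · subst h; rfl
      · exact pvTDC_nonspace 10 _ _ [] (by simp) c h
    · exact pvTDC_nonspace 10 _ _ [] (by simp) c hc
  · split_ifs with hz
    · simp
    · exact pvToDigits_ne_nil 10 _

theorem pvJoin_ne_nil {q : List Char} (rest : List (List Char)) (hq : q ≠ []) :
    PySem.Chars.join pvSp4 (q :: rest) ≠ [] := by
  cases rest with
  | nil => rw [PySem.Chars.join_singleton]; exact hq
  | cons r rs => rw [PySem.Chars.join_cons_cons]; simp [hq]

theorem pvRstripJoin : ∀ (pieces : List (List Char)), (∀ p ∈ pieces, pvSolid p) →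
    PySem.Chars.rstrip (List.flatten (pieces.map (· ++ pvSp4))) = PySem.Chars.join pvSp4 pieces
  | [], _ => by simp [PySem.Chars.join_nil, PySem.Chars.rstrip]
  | [p], h => by
    simp only [List.map_cons, List.map_nil, List.flatten_cons, List.flatten_nil, List.append_nil]
    rw [pvRstrip_sp4, (h p (List.mem_singleton_self p)).1, PySem.Chars.join_singleton]
  | p :: q :: rest, h => by
    have hq : PySem.Chars.rstrip (List.flatten ((q :: rest).map (· ++ pvSp4)))
        = PySem.Chars.join pvSp4 (q :: rest) :=
      pvRstripJoin (q :: rest) (fun x hx => h x (List.mem_cons_of_mem p hx))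
    have hne : PySem.Chars.rstrip (List.flatten ((q :: rest).map (· ++ pvSp4))) ≠ [] := by
      rw [hq]; exact pvJoin_ne_nil rest (h q (by simp)).2
    simp only [List.map_cons, List.flatten_cons]
    rw [show (p ++ pvSp4) ++ ((q ++ pvSp4) ++ ((rest.map (· ++ pvSp4)).flatten))
        = (p ++ pvSp4) ++ (((q :: rest).map (· ++ pvSp4)).flatten) by simp]
    rw [pvRstrip_append hne, hq, PySem.Chars.join_cons_cons]

-- membership in a zipWith3 list
theorem pvZip3_forall {α : Type} {P : α → Prop} {f : List Char → List Char → List Char → α} :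
    ∀ (as bs cs : List (List Char)),
    (∀ a ∈ as, ∀ b ∈ bs, ∀ c ∈ cs, P (f a b c)) → ∀ p ∈ List.zipWith3 f as bs cs, P p := by
  intro as
  induction as with
  | nil => intro bs cs _ p hp; simp [List.zipWith3] at hp
  | cons a as ih =>
    intro bs cs h p hp
    cases bs with
    | nil => simp [List.zipWith3] at hp
    | cons b bs =>
      cases cs with
      | nil => simp [List.zipWith3] at hp
      | cons c cs =>
        simp only [List.zipWith3, List.mem_cons] at hp
        rcases hp with hp | hp
        · subst hp; exact h a (by simp) b (by simp) c (by simp)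
        · exact ih bs cs (fun x hx y hy z hz => h x (by simp [hx]) y (by simp [hy]) z (by simp [hz])) p hp

-- map over a zipWith3 fuses
theorem pvMap_zip3 {α β : Type} (g : α → β) (f : List Char → List Char → List Char → α) :
    ∀ (as bs cs : List (List Char)),
    (List.zipWith3 f as bs cs).map g = List.zipWith3 (fun a b c => g (f a b c)) as bs cs := by
  intro as
  induction as with
  | nil => intro bs cs; simp [List.zipWith3]
  | cons a as ih =>
    intro bs cs
    cases bs with
    | nil => simp [List.zipWith3]
    | cons b bs =>
      cases cs with
      | nil => simp [List.zipWith3]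
      | cons c cs => simp [List.zipWith3, ih]


theorem pvZip3_length {α : Type} (f : List Char → List Char → List Char → α) :
    ∀ (as bs cs : List (List Char)), bs.length = as.length → cs.length = as.length →
    (List.zipWith3 f as bs cs).length = as.length := by
  intro as
  induction as with
  | nil => intro bs cs _ _; simp [List.zipWith3]
  | cons a as ih =>
    intro bs cs hb hc
    cases bs with
    | nil => simp at hb
    | cons b bs =>
      cases cs with
      | nil => simp at hc
      | cons c cs =>
        simp only [List.zipWith3, List.length_cons]
        rw [ih bs cs (by simpa using hb) (by simpa using hc)]

-- re-zipping a zipWith3 result with two of its sources fuses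
theorem pvZip3_rezip {α : Type} (g : α → List Char → List Char → α) (f : List Char → List Char → List Char → α) :
    ∀ (as bs cs : List (List Char)),
    List.zipWith3 g (List.zipWith3 f as bs cs) as bs = List.zipWith3 (fun a b c => g (f a b c) a b) as bs cs := by
  intro as
  induction as with
  | nil => intro bs cs; simp [List.zipWith3]
  | cons a as ih =>
    intro bs cs
    cases bs with
    | nil => simp [List.zipWith3]
    | cons b bs =>
      cases cs with
      | nil => simp [List.zipWith3]
      | cons c cs => simp [List.zipWith3, ih]

-- pvParse succeeds only on digit operands, and reveals the split
theorem pvParse_ok {p : String} {a op b : List Char} (h : pvParse p = .ok (a, op, b)) :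
    PySem.Chars.split₀ p.toList = [a, op, b] ∧
    PySem.Chars.strIsdigit a = true ∧ PySem.Chars.strIsdigit b = true := by
  unfold pvParse at h
  split at h
  · next x y z heq =>
    split_ifs at h with h1 h2 h3
    cases h
    exact ⟨heq, not_not.mp (not_or.mp h2).1, not_not.mp (not_or.mp h2).2⟩
  · simp at h

-- B's _validate agrees with A's in-loop validation
theorem pvValidate_parse (p : String) :
    pvValidate p = match pvParse p with | .error e => some e | .ok _ => none := by
  unfold pvValidate pvParse
  rcases PySem.Chars.split₀ p.toList with _ | ⟨a, _ | ⟨op, _ | ⟨b, _ | ⟨c, t⟩⟩⟩⟩ <;>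
    try rfl
  simp only []
  split_ifs <;> rfl

-- A's collection loop characterised: same first error as B's validation pass, or its four
-- lists described through the per-problem splits
theorem pvA_rel (da : Bool) : ∀ ps : List String,
    (∃ e, pvA_collect da ps = .error e ∧ pvFirstErr ps = some e) ∨
    (∃ fos sos ops,
      pvA_collect da ps = .ok (fos, sos, ops,
        if da then List.zipWith3 (fun a b o => pvAnswer a o b) fos sos ops else []) ∧
      pvFirstErr ps = none ∧
      ps.map (fun p => PySem.Chars.split₀ p.toList) = List.zipWith3 (fun a b o => [a, o, b]) fos sos ops ∧
      sos.length = fos.length ∧ ops.length = fos.length ∧ fos.length = ps.length ∧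
      (∀ x ∈ fos, PySem.Chars.strIsdigit x = true) ∧
      (∀ x ∈ sos, PySem.Chars.strIsdigit x = true)) := by
  intro ps
  induction ps with
  | nil =>
    right
    exact ⟨[], [], [], by cases da <;> rfl, rfl, by simp [List.zipWith3], rfl, rfl, rfl, by simp, by simp⟩
  | cons p rest ih =>
    rcases hp : pvParse p with e | ⟨a, op, b⟩
    · left
      exact ⟨e, by simp [pvA_collect, hp], by simp [pvFirstErr, pvValidate_parse, hp]⟩
    · obtain ⟨hsplit, hda, hdb⟩ := pvParse_ok hp
      rcases ih with ⟨e, hA, hE⟩ | ⟨fos, sos, ops, hA, hE, hmap, h1, h2, h3, h5, h6⟩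
      · left
        exact ⟨e, by simp [pvA_collect, hp, hA], by simp [pvFirstErr, pvValidate_parse, hp, hE]⟩
      · right
        refine ⟨a :: fos, b :: sos, op :: ops, ?_, ?_, ?_, by simp [h1], by simp [h2], by simp [h3], ?_, ?_⟩
        · simp only [pvA_collect, hp, hA]
          cases da <;> simp [List.zipWith3]
        · simp [pvFirstErr, pvValidate_parse, hp, hE]
        · simp [List.zipWith3, hsplit, hmap]
        · intro x hx; rcases List.mem_cons.mp hx with h | h
          · subst h; exact hda
          · exact h5 x h
        · intro x hx; rcases List.mem_cons.mp hx with h | h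
          · subst h; exact hdb
          · exact h6 x h

-- A's second loop acts independently on the four accumulated lines
theorem pvFoldQuadA (da : Bool) (fos sos ops ans : List (List Char)) :
    ∀ (l : List Int) (a b c d : List Char),
    l.foldl (fun (st : List Char × List Char × List Char × List Char) i =>
      let fo := PySem.List.pyGetD fos i []
      let so := PySem.List.pyGetD sos i []
      let op := PySem.List.pyGetD ops i []
      let width := max fo.length so.length + 2
      (st.1 ++ pvRjust fo width ++ pvSp4,
       st.2.1 ++ op ++ pvRjust so (width - 1) ++ pvSp4,
       st.2.2.1 ++ List.replicate width '-' ++ pvSp4,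
       if da then st.2.2.2 ++ pvRjust (PySem.List.pyGetD ans i []) width ++ pvSp4
       else st.2.2.2)) (a, b, c, d)
    = (l.foldl (fun acc i => acc ++ (pvRjust (PySem.List.pyGetD fos i [])
          (max (PySem.List.pyGetD fos i []).length (PySem.List.pyGetD sos i []).length + 2) ++ pvSp4)) a,
       l.foldl (fun acc i => acc ++ (PySem.List.pyGetD ops i [] ++ pvRjust (PySem.List.pyGetD sos i [])
          (max (PySem.List.pyGetD fos i []).length (PySem.List.pyGetD sos i []).length + 2 - 1) ++ pvSp4)) b,
       l.foldl (fun acc i => acc ++ (List.replicate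
          (max (PySem.List.pyGetD fos i []).length (PySem.List.pyGetD sos i []).length + 2) '-' ++ pvSp4)) c,
       if da then l.foldl (fun acc i => acc ++ (pvRjust (PySem.List.pyGetD ans i [])
          (max (PySem.List.pyGetD fos i []).length (PySem.List.pyGetD sos i []).length + 2) ++ pvSp4)) d else d) := by
  intro l
  induction l with
  | nil => intro a b c d; cases da <;> simp
  | cons i l ih =>
    intro a b c d
    simp only [List.foldl_cons]
    rw [ih]
    cases da <;> simp [List.append_assoc]

-- an index loop over range reading three parallel lists is a zipWith3
theorem pvRangeZip3 {α : Type} (f : List Char → List Char → List Char → α) :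
    ∀ (as bs cs : List (List Char)), bs.length = as.length → cs.length = as.length →
    (List.range as.length).map (fun k => f (as.getD k []) (bs.getD k []) (cs.getD k []))
      = List.zipWith3 f as bs cs := by
  intro as
  induction as with
  | nil => intro bs cs _ _; simp [List.zipWith3]
  | cons a as ih =>
    intro bs cs hb hc
    cases bs with
    | nil => simp at hb
    | cons b bs =>
      cases cs with
      | nil => simp at hc
      | cons c cs =>
        simp only [List.length_cons, List.range_succ_eq_map, List.map_cons, List.map_map]
        simp only [List.getD_cons_zero, List.zipWith3]
        congr 1
        rw [← ih bs cs (by simpa using hb) (by simpa using hc)]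
        rfl

theorem pvSolid_rjust_of {y : List Char} (w : Nat) (hy : PySem.Chars.rstrip y = y) (hne : y ≠ []) :
    pvSolid (pvRjust y w) :=
  pvSolid_append_of (List.replicate (w - y.length) ' ') hy hne

-- one accumulated line of A's second loop: rstrip of the concatenation of separator-padded
-- pieces read off three parallel lists equals '    '.join of the pieces
theorem pvLine {f : List Char → List Char → List Char → List Char}
    (as bs cs : List (List Char)) (n : Nat) (hn : as.length = n)
    (hb : bs.length = as.length) (hc : cs.length = as.length)
    (hsolid : ∀ a ∈ as, ∀ b ∈ bs, ∀ c ∈ cs, pvSolid (f a b c)) :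
    PySem.Chars.rstrip (List.foldl (fun acc i =>
        acc ++ (f (PySem.List.pyGetD as i []) (PySem.List.pyGetD bs i []) (PySem.List.pyGetD cs i []) ++ pvSp4))
        [] (PySem.List.pyRange 0 (n : Int)))
      = PySem.Chars.join pvSp4 (List.zipWith3 f as bs cs) := by
  subst hn
  rw [PySem.List.foldl_append_eq_flatMap, List.nil_append, PySem.List.pyRange_zero_natCast]
  rw [List.flatMap_def, List.map_map]
  simp only [Function.comp_def, PySem.List.pyGetD_natCast]
  rw [show (fun k => f (as.getD k []) (bs.getD k []) (cs.getD k []) ++ pvSp4)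
      = ((· ++ pvSp4) ∘ (fun k => f (as.getD k []) (bs.getD k []) (cs.getD k []))) from rfl]
  rw [← List.map_map, pvRangeZip3 f as bs cs hb hc]
  exact pvRstripJoin _ (pvZip3_forall as bs cs hsolid)

-- B's cells of one row, over the split triples, as a zipWith3 over A's three operand lists
theorem pvRowCells (row : Int) (fos sos ops : List (List Char)) (problems : List String)
    (hmap : problems.map (fun p => PySem.Chars.split₀ p.toList)
      = List.zipWith3 (fun a b o => [a, o, b]) fos sos ops) :
    (problems.map (fun p => PySem.Chars.split₀ p.toList)).map (fun t =>
        match t with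
        | [a, op, b] => pvCell row a op b
        | _ => [])
      = List.zipWith3 (fun a b o => pvCell row a o b) fos sos ops := by
  rw [hmap, pvMap_zip3]

-- ===== VERDICT (by name: the statement is the Claim_ definition above) =====
theorem arithmetic_visualizer_spec : Claim_equal_arithmetic_visualizer := by
  intro problems da _
  unfold Spec_arithmetic_visualizer arithmetic_visualizer arithmetic_visualizer_alt
  by_cases h5 : problems.length > 5
  · simp [h5]
  · simp only [if_neg h5]
    rcases pvA_rel da problems with ⟨e, hA, hE⟩ | ⟨fos, sos, ops, hA, hE, hmap, h1, h2, h3, hdf, hds⟩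
    · rw [hA, hE]
    · rw [hA, hE]
      simp only [pvFoldQuadA]
      have hTop := pvLine (f := fun a b _ => pvRjust a (max a.length b.length + 2))
        fos sos ops problems.length h3 h1 h2
        (fun a ha _ _ _ _ => pvSolid_rjust_digits _ (hdf a ha))
      have hBot := pvLine (f := fun a b c => c ++ pvRjust b (max a.length b.length + 2 - 1))
        fos sos ops problems.length h3 h1 h2
        (fun _ _ b hb c _ => pvSolid_op_rjust c _ (hds b hb))
      have hDash := pvLine (f := fun a b _ => List.replicate (max a.length b.length + 2) '-')
        fos sos ops problems.length h3 h1 h2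
        (fun _ _ _ _ _ _ => pvSolid_dashes _ (by omega))
      have hC0 := pvRowCells 0 fos sos ops problems hmap
      have hC1 := pvRowCells 1 fos sos ops problems hmap
      have hC2 := pvRowCells 2 fos sos ops problems hmap
      cases da with
      | false =>
        simp only [Bool.false_eq_true, if_false, List.append_nil]
        rw [hTop, hBot, hDash]
        show _ = String.mk (PySem.Chars.join ['\n'] ((PySem.List.pyRange 0 3).map _))
        rw [show PySem.List.pyRange 0 3 = [0, 1, 2] from rfl]
        simp only [List.map_cons, List.map_nil]
        rw [hC0, hC1, hC2]
        simp only [pvCell, if_pos rfl, if_neg (by decide : (0:Int) ≠ 1), if_neg (by decide : (0:Int) ≠ 2),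
          if_neg (by decide : (1:Int) ≠ 0), if_pos rfl, if_neg (by decide : (1:Int) ≠ 2),
          if_neg (by decide : (2:Int) ≠ 0), if_neg (by decide : (2:Int) ≠ 1)]
        rw [PySem.Chars.join_cons_cons, PySem.Chars.join_cons_cons, PySem.Chars.join_singleton]
        simp [List.append_assoc]
      | true =>
        have hansL : sos.length = fos.length := h1
        have hAns := pvLine (f := fun x a b => pvRjust x (max a.length b.length + 2))
          (List.zipWith3 (fun a b o => pvAnswer a o b) fos sos ops) fos sos problems.length
          (by rw [pvZip3_length _ fos sos ops h1 h2]; exact h3)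
          (by rw [pvZip3_length _ fos sos ops h1 h2])
          (by rw [pvZip3_length _ fos sos ops h1 h2]; exact h1)
          (fun x hx _ _ _ _ => by
            have : ∃ z, x = PySem.Int.toChars z := by
              refine pvZip3_forall (P := fun x => ∃ z, x = PySem.Int.toChars z) fos sos ops
                (fun a _ b _ o _ => ?_) x hx
              unfold pvAnswer; split_ifs <;> exact ⟨_, rfl⟩
            rcases this with ⟨z, rfl⟩
            exact pvSolid_rjust_of _ (pvToChars_solid z).1 (pvToChars_solid z).2)
        have hC3 := pvRowCells 3 fos sos ops problems hmap
        simp only [if_true]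
        rw [hTop, hBot, hDash, hAns]
        rw [pvZip3_rezip]
        show _ = String.mk (PySem.Chars.join ['\n'] ((PySem.List.pyRange 0 4).map _))
        rw [show PySem.List.pyRange 0 4 = [0, 1, 2, 3] from rfl]
        simp only [List.map_cons, List.map_nil]
        rw [hC0, hC1, hC2, hC3]
        simp only [pvCell, pvAnswer, if_pos rfl, if_neg (by decide : (0:Int) ≠ 1), if_neg (by decide : (0:Int) ≠ 2),
          if_neg (by decide : (1:Int) ≠ 0), if_neg (by decide : (1:Int) ≠ 2),
          if_neg (by decide : (2:Int) ≠ 0), if_neg (by decide : (2:Int) ≠ 1),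
          if_neg (by decide : (3:Int) ≠ 0), if_neg (by decide : (3:Int) ≠ 1), if_neg (by decide : (3:Int) ≠ 2)]
        rw [PySem.Chars.join_cons_cons, PySem.Chars.join_cons_cons, PySem.Chars.join_cons_cons,
          PySem.Chars.join_singleton]
        simp [List.append_assoc]
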